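-- pv_equiv track=rewrite | github.com/kitzmanlab/wt1_splice | splfxseq/splanl/inspect_variants.py | dist_from_ref
-- ===== SOURCE A (Python) =====
-- def edit_distance(s1, s2):
--
--     m=len(s1)+1
--     n=len(s2)+1
--
--     tbl = {}
--     for i in range(m): tbl[i,0]=i
--     for j in range(n): tbl[0,j]=j
--     for i in range(1, m):
--         for j in range(1, n):
--             cost = 0 if s1[i-1] == s2[j-1] else 1
--             tbl[i,j] = min(tbl[i, j-1]+1, tbl[i-1, j]+1, tbl[i-1, j-1]+cost)
--
--     return tbl[i,j]
--
-- def dist_from_ref( refseq,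
--                     altseq,
--                     dcan_isos):
--
--     dcan_isos_dist = {}
--     bases_used = 0
--     for can_iso, iso_coords in dcan_isos.items():
--
--         #subtract 1 from refseq coords to adjust for 1 and 0 based coords
--         dcan_isos_dist[ can_iso ] = edit_distance( refseq[ iso_coords[0] - 1: iso_coords[1] ],
--                                                     altseq[ bases_used: bases_used + ( iso_coords[1] - iso_coords[0] + 1 ) ] )
--
--         bases_used += iso_coords[1] - iso_coords[0] + 1
--
--     return dcan_isos_dist
-- ===== SOURCE B (Python) =====
-- def _strip(s1, s2, i, j):
--     # slide back over matching characters (free moves on the diagonal)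
--     while i and j and s1[i - 1] == s2[j - 1]:
--         i -= 1
--         j -= 1
--     return (i, j)
--
-- def _children(s1, s2, i, j):
--     return (_strip(s1, s2, i - 1, j), _strip(s1, s2, i, j - 1), _strip(s1, s2, i - 1, j - 1))
--
-- def _ed(s1, s2):
--     # edit distance as shortest path over mismatch cells only:
--     # discover the reachable mismatch cells with a worklist, then
--     # evaluate them in order of increasing i+j.
--     start = _strip(s1, s2, len(s1), len(s2))
--     if start[0] == 0:
--         return start[1]
--     if start[1] == 0:
--         return start[0]
--     seen = {start: None}
--     todo = [start]
--     while todo: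
--         i, j = todo.pop()
--         for q in _children(s1, s2, i, j):
--             if q[0] and q[1] and q not in seen:
--                 seen[q] = None
--                 todo.append(q)
--     memo = {}
--     for p in sorted(seen, key=lambda p: p[0] + p[1]):
--         memo[p] = 1 + min(q[1] if q[0] == 0 else q[0] if q[1] == 0 else memo[q]
--                           for q in _children(s1, s2, *p))
--     return memo[start]
--
-- def dist_from_ref(refseq, altseq, dcan_isos):
--     lengths = [hi - lo + 1 for lo, hi in dcan_isos.values()]
--     starts = [0]
--     for L in lengths:
--         starts.append(starts[-1] + L)
--     return {iso: _ed(refseq[lo - 1:hi], altseq[s:s + L])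
--             for (iso, (lo, hi)), s, L in zip(dcan_isos.items(), starts, lengths)}
-- ===== Notes on version B (the rewrite author's own statement) =====
-- stated objective: alternative
-- what changed: edit_distance's bottom-up full-table DP over two nested index loops is replaced by an output-sensitive shortest-path style computation: match runs are skipped by a strip helper, only the reachable mismatch cells are discovered with an explicit worklist, and those sparse cells are evaluated in order of increasing i+j; the wrapper's running bases_used accumulator becomes a precomputed prefix-sum list consumed by a zip comprehension.
import Mathlib
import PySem

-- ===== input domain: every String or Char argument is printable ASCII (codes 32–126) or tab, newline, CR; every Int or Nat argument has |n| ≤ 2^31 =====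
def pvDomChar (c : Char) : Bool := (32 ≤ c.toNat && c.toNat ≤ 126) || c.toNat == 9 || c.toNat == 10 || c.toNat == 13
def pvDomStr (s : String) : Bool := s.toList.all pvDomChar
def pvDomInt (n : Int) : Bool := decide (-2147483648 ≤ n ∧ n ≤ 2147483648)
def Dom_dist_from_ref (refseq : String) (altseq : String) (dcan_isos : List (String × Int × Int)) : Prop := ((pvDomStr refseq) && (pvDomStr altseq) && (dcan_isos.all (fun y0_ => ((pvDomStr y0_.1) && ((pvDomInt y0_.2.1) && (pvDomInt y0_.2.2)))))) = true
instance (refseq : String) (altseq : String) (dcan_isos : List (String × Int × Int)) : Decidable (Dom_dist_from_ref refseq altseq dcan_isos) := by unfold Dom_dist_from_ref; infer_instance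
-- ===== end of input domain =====

-- B replaces A's bottom-up full-table DP for the per-isoform edit distance by a sparse
-- computation over mismatch cells only (strip match runs, discover reachable cells with a
-- worklist, evaluate them in order of increasing i+j); same return value (alternative).
-- ===== PORT A =====
-- edit_distance: full (i,j)-keyed table in a dict, leftover loop variables index the result.
def edA (s1 s2 : List Char) : Int :=
  let m : Int := (s1.length : Int) + 1
  let n : Int := (s2.length : Int) + 1
  let st1 : PySem.Dict (Int × Int) Int × Int :=
    (PySem.List.pyRange 0 m 1).foldl (fun p i => (p.1.insert (i, 0) i, i)) (PySem.Dict.empty, 0)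
  let st2 : PySem.Dict (Int × Int) Int × Int :=
    (PySem.List.pyRange 0 n 1).foldl (fun p j => (p.1.insert (0, j) j, j)) (st1.1, 0)
  let st3 : PySem.Dict (Int × Int) Int × Int × Int :=
    (PySem.List.pyRange 1 m 1).foldl (fun q i =>
      let r : PySem.Dict (Int × Int) Int × Int :=
        (PySem.List.pyRange 1 n 1).foldl (fun r j =>
          let cost : Int := if PySem.List.pyGet? s1 (i - 1) = PySem.List.pyGet? s2 (j - 1) then 0 else 1
          (r.1.insert (i, j) (min (min (r.1.getD (i, j - 1) 0 + 1) (r.1.getD (i - 1, j) 0 + 1))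
              (r.1.getD (i - 1, j - 1) 0 + cost)), j)) (q.1, q.2.2)
      (r.1, i, r.2)) (st2.1, st1.2, st2.2)
  st3.1.getD (st3.2.1, st3.2.2) 0

def dist_from_ref (refseq : String) (altseq : String) (dcan_isos : List (String × Int × Int)) : List (String × Int) :=
  ((PySem.Dict.ofList dcan_isos).items.foldl
    (fun (st : PySem.Dict String Int × Int) p =>
      (st.1.insert p.1 (edA (PySem.List.slice refseq.toList (some (p.2.1 - 1)) (some p.2.2))
                            (PySem.List.slice altseq.toList (some st.2) (some (st.2 + (p.2.2 - p.2.1 + 1))))),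
       st.2 + (p.2.2 - p.2.1 + 1)))
    (PySem.Dict.empty, 0)).1.items

-- ===== PORT B =====
-- _strip: slide back over matching characters; its s1[i-1]/s2[j-1] accesses are always in
-- range in every call B makes, so getD with a dummy default is exact there.
def stripB (s1 s2 : List Char) : Nat → Nat → Nat × Nat
  | i+1, j+1 => if s1.getD i ' ' = s2.getD j ' ' then stripB s1 s2 i j else (i+1, j+1)
  | i, j => (i, j)

def childrenB (s1 s2 : List Char) (i j : Nat) : List (Nat × Nat) :=
  [stripB s1 s2 (i-1) j, stripB s1 s2 i (j-1), stripB s1 s2 (i-1) (j-1)]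

-- discovery worklist (Python appends/pops at the list's end; here the head is the top of the
-- stack — same abstract stack).  The fuel argument only makes the loop total: it is large
-- enough that it never runs out (proved below), Python has no counterpart of it.
def discoverB (s1 s2 : List Char) : Nat → List (Nat × Nat) → List (Nat × Nat) → List (Nat × Nat)
  | 0, seen, _ => seen
  | _+1, seen, [] => seen
  | fuel+1, seen, p :: todo =>
      let st := (childrenB s1 s2 p.1 p.2).foldl
        (fun (st : List (Nat × Nat) × List (Nat × Nat)) q =>
          if q.1 ≠ 0 ∧ q.2 ≠ 0 ∧ q ∉ st.1 then (st.1 ++ [q], q :: st.2) else st)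
        (seen, todo)
      discoverB s1 s2 fuel st.1 st.2

-- value of a child in the min-generator: trivial cells are their distance, else memo lookup
-- (the key is always present — proved below; Python would raise KeyError were it not).
def childValB (memo : PySem.Dict (Nat × Nat) Int) (q : Nat × Nat) : Int :=
  if q.1 = 0 then (q.2 : Int) else if q.2 = 0 then (q.1 : Int) else memo.getD q 0

def evalB (s1 s2 : List Char) (cells : List (Nat × Nat)) : PySem.Dict (Nat × Nat) Int :=
  cells.foldl (fun memo p =>
    memo.insert p (1 + min (min (childValB memo (stripB s1 s2 (p.1 - 1) p.2))
                                (childValB memo (stripB s1 s2 p.1 (p.2 - 1))))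
                           (childValB memo (stripB s1 s2 (p.1 - 1) (p.2 - 1)))))
    PySem.Dict.empty

def edB (s1 s2 : List Char) : Int :=
  let start := stripB s1 s2 s1.length s2.length
  if start.1 = 0 then (start.2 : Int)
  else if start.2 = 0 then (start.1 : Int)
  else
    let seen := discoverB s1 s2 (2 * (s1.length + 1) * (s2.length + 1) + 2) [start] [start]
    let cells := PySem.List.sorted seen (fun p => p.1 + p.2) false
    (evalB s1 s2 cells).getD start 0

def dist_from_ref_alt (refseq : String) (altseq : String) (dcan_isos : List (String × Int × Int)) : List (String × Int) :=
  let items := (PySem.Dict.ofList dcan_isos).items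
  let lengths : List Int := items.map (fun p => p.2.2 - p.2.1 + 1)
  let starts := lengths.foldl (fun st L => st ++ [(PySem.List.pyGet? st (-1)).getD 0 + L]) [(0 : Int)]
  (items.zip (starts.zip lengths)).map (fun q =>
      (q.1.1, edB (PySem.List.slice refseq.toList (some (q.1.2.1 - 1)) (some q.1.2.2))
                  (PySem.List.slice altseq.toList (some q.2.1) (some (q.2.1 + q.2.2)))))

-- ===== PRECONDITION & SPEC =====
def Spec_dist_from_ref (refseq : String) (altseq : String) (dcan_isos : List (String × Int × Int)) (out : List (String × Int)) : Prop := out = dist_from_ref_alt refseq altseq dcan_isos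
instance (refseq : String) (altseq : String) (dcan_isos : List (String × Int × Int)) (out : List (String × Int)) : Decidable (Spec_dist_from_ref refseq altseq dcan_isos out) := by unfold Spec_dist_from_ref; infer_instance

-- ===== CLAIM (what is proved, stated in full; the proofs are below) =====
def Claim_equal_dist_from_ref : Prop := ∀ (refseq : String) (altseq : String) (dcan_isos : List (String × Int × Int)), Dom_dist_from_ref refseq altseq dcan_isos → Spec_dist_from_ref refseq altseq dcan_isos (dist_from_ref refseq altseq dcan_isos)

-- ===== LEMMAS AND PROOFS =====
-- EDf is the textbook edit-distance recurrence on prefix lengths; both ports equal it.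
def EDf (s1 s2 : List Char) : Nat → Nat → Int
  | 0, j => (j : Int)
  | i+1, 0 => ((i : Int) + 1)
  | i+1, j+1 => min (min (EDf s1 s2 (i+1) j + 1) (EDf s1 s2 i (j+1) + 1))
      (EDf s1 s2 i j + (if s1.getD i ' ' ≠ s2.getD j ' ' then 1 else 0))
  termination_by i j => (i, j)

lemma EDf_row0 (s1 s2 : List Char) (b : Nat) : EDf s1 s2 0 b = (b : Int) := by rw [EDf]

lemma EDf_col0 (s1 s2 : List Char) (a : Nat) : EDf s1 s2 a 0 = (a : Int) := by
  cases a with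
  | zero => rw [EDf]
  | succ a' => rw [EDf]; push_cast; ring

-- first init loop: tbl[i,0]=i
lemma fold1_spec (N : Nat) (i0 : Int) :
    (∀ key : Int × Int,
      (((List.range N).map (fun k : Nat => (k:Int))).foldl
        (fun (p : PySem.Dict (Int × Int) Int × Int) i => (p.1.insert (i, 0) i, i))
        (PySem.Dict.empty, i0)).1.getD key 0
      = if key.2 = 0 ∧ 0 ≤ key.1 ∧ key.1 < (N:Int) then key.1 else 0)
    ∧ (((List.range N).map (fun k : Nat => (k:Int))).foldl
        (fun (p : PySem.Dict (Int × Int) Int × Int) i => (p.1.insert (i, 0) i, i))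
        (PySem.Dict.empty, i0)).2 = if N = 0 then i0 else (N:Int) - 1 := by
  induction N with
  | zero => simp [PySem.Dict.getD_empty]
  | succ N ih =>
      rw [List.range_succ]
      simp only [List.map_append, List.map_cons, List.map_nil, List.foldl_append, List.foldl_cons,
        List.foldl_nil]
      constructor
      · intro key
        rw [PySem.Dict.getD_insert, ih.1 key]
        rcases key with ⟨a, b⟩
        simp only [Prod.ext_iff]
        split_ifs <;> simp_all <;> omega
      · simp

-- second init loop: tbl[0,j]=j, over an arbitrary base dict
lemma fold2_spec (N : Nat) (d : PySem.Dict (Int × Int) Int) (j0 : Int) :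
    (∀ key : Int × Int,
      (((List.range N).map (fun k : Nat => (k:Int))).foldl
        (fun (p : PySem.Dict (Int × Int) Int × Int) j => (p.1.insert (0, j) j, j))
        (d, j0)).1.getD key 0
      = if key.1 = 0 ∧ 0 ≤ key.2 ∧ key.2 < (N:Int) then key.2 else d.getD key 0)
    ∧ (((List.range N).map (fun k : Nat => (k:Int))).foldl
        (fun (p : PySem.Dict (Int × Int) Int × Int) j => (p.1.insert (0, j) j, j))
        (d, j0)).2 = if N = 0 then j0 else (N:Int) - 1 := by
  induction N with
  | zero => simp
  | succ N ih =>
      rw [List.range_succ]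
      simp only [List.map_append, List.map_cons, List.map_nil, List.foldl_append, List.foldl_cons,
        List.foldl_nil]
      constructor
      · intro key
        rw [PySem.Dict.getD_insert, ih.1 key]
        rcases key with ⟨a, b⟩
        simp only [Prod.ext_iff]
        split_ifs <;> simp_all <;> omega
      · simp

def CondA (K J a b : Nat) : Prop := b = 0 ∨ a ≤ K ∨ (a = K + 1 ∧ b ≤ J)

lemma inner_spec (s1 s2 : List Char) (K : Nat) (hK : K < s1.length) :
    ∀ (J : Nat), J ≤ s2.length → ∀ (t : PySem.Dict (Int × Int) Int) (j0 : Int),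
    (∀ a b : Nat, a ≤ s1.length → b ≤ s2.length → CondA K 0 a b →
        t.getD ((a:Int), (b:Int)) 0 = EDf s1 s2 a b) →
    (∀ a b : Nat, a ≤ s1.length → b ≤ s2.length → CondA K J a b →
      (((List.range J).map (fun k : Nat => ((k:Int)+1))).foldl
        (fun (r : PySem.Dict (Int × Int) Int × Int) j =>
          (r.1.insert (((K:Int)+1), j)
            (min (min (r.1.getD (((K:Int)+1), j - 1) 0 + 1) (r.1.getD (((K:Int)+1) - 1, j) 0 + 1))
              (r.1.getD (((K:Int)+1) - 1, j - 1) 0 +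
                (if PySem.List.pyGet? s1 (((K:Int)+1) - 1) = PySem.List.pyGet? s2 (j - 1) then 0 else 1))), j))
        (t, j0)).1.getD ((a:Int), (b:Int)) 0 = EDf s1 s2 a b)
    ∧ (((List.range J).map (fun k : Nat => ((k:Int)+1))).foldl
        (fun (r : PySem.Dict (Int × Int) Int × Int) j =>
          (r.1.insert (((K:Int)+1), j)
            (min (min (r.1.getD (((K:Int)+1), j - 1) 0 + 1) (r.1.getD (((K:Int)+1) - 1, j) 0 + 1))
              (r.1.getD (((K:Int)+1) - 1, j - 1) 0 +
                (if PySem.List.pyGet? s1 (((K:Int)+1) - 1) = PySem.List.pyGet? s2 (j - 1) then 0 else 1))), j))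
        (t, j0)).2 = (if J = 0 then j0 else (J:Int)) := by
  intro J
  induction J with
  | zero => intro _ t j0 ht; exact ⟨fun a b ha hb hc => ht a b ha hb hc, by simp⟩
  | succ J ih =>
      intro hJ t j0 ht
      have hJ' : J ≤ s2.length := by omega
      obtain ⟨ih1, ih2⟩ := ih hJ' t j0 ht
      rw [List.range_succ]
      simp only [List.map_append, List.map_cons, List.map_nil, List.foldl_append, List.foldl_cons,
        List.foldl_nil]
      set r := (((List.range J).map (fun k : Nat => ((k:Int)+1))).foldl
        (fun (r : PySem.Dict (Int × Int) Int × Int) j =>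
          (r.1.insert (((K:Int)+1), j)
            (min (min (r.1.getD (((K:Int)+1), j - 1) 0 + 1) (r.1.getD (((K:Int)+1) - 1, j) 0 + 1))
              (r.1.getD (((K:Int)+1) - 1, j - 1) 0 +
                (if PySem.List.pyGet? s1 (((K:Int)+1) - 1) = PySem.List.pyGet? s2 (j - 1) then 0 else 1))), j))
        (t, j0)) with hr
      have e1 : ((J:Int) + 1) - 1 = (J:Int) := by ring
      have e2 : ((K:Int) + 1) - 1 = (K:Int) := by ring
      have hg1 : PySem.List.pyGet? s1 (((K:Int)+1) - 1) = some s1[K] := by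
        rw [e2, PySem.List.pyGet?_natCast, List.getElem?_eq_getElem hK]
      have hg2 : PySem.List.pyGet? s2 (((J:Int)+1) - 1) = some s2[J] := by
        rw [e1, PySem.List.pyGet?_natCast, List.getElem?_eq_getElem (by omega : J < s2.length)]
        rfl
      have hv1 : r.1.getD (((K:Int)+1), ((J:Int)+1) - 1) 0 = EDf s1 s2 (K+1) J := by
        rw [e1]
        have := ih1 (K+1) J (by omega) hJ' (Or.inr (Or.inr ⟨rfl, le_refl J⟩))
        push_cast at this
        exact this
      have hv2 : r.1.getD (((K:Int)+1) - 1, ((J:Int)+1)) 0 = EDf s1 s2 K (J+1) := by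
        rw [e2]
        have := ih1 K (J+1) (by omega) hJ (Or.inr (Or.inl (le_refl K)))
        push_cast at this
        exact this
      have hv3 : r.1.getD (((K:Int)+1) - 1, ((J:Int)+1) - 1) 0 = EDf s1 s2 K J := by
        rw [e1, e2]
        exact ih1 K J (by omega) hJ' (Or.inr (Or.inl (le_refl K)))
      have hcost : (if PySem.List.pyGet? s1 (((K:Int)+1) - 1) = PySem.List.pyGet? s2 (((J:Int)+1) - 1) then (0:Int) else 1)
          = (if s1.getD K ' ' ≠ s2.getD J ' ' then (1:Int) else 0) := by
        rw [hg1, hg2]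
        have hgd1 : s1.getD K ' ' = s1[K] := by
          rw [List.getD_eq_getElem?_getD, List.getElem?_eq_getElem hK]; rfl
        have hgd2 : s2.getD J ' ' = s2[J] := by
          rw [List.getD_eq_getElem?_getD, List.getElem?_eq_getElem (by omega : J < s2.length)]; rfl
        rw [hgd1, hgd2]
        by_cases h : s1[K] = s2[J]
        · rw [if_pos (by rw [h]), if_neg (by simp [h])]
        · rw [if_neg (by simp [h]), if_pos h]
      have hV : min (min (r.1.getD (((K:Int)+1), ((J:Int)+1) - 1) 0 + 1) (r.1.getD (((K:Int)+1) - 1, ((J:Int)+1)) 0 + 1))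
              (r.1.getD (((K:Int)+1) - 1, ((J:Int)+1) - 1) 0 +
                (if PySem.List.pyGet? s1 (((K:Int)+1) - 1) = PySem.List.pyGet? s2 (((J:Int)+1) - 1) then 0 else 1))
          = EDf s1 s2 (K+1) (J+1) := by
        rw [hv1, hv2, hv3, hcost, EDf]
      constructor
      · intro a b ha hb hc
        show (r.1.insert (((K:Int)+1), ((J:Int)+1)) _).getD ((a:Int), (b:Int)) 0 = _
        rw [PySem.Dict.getD_insert, hV]
        by_cases hkey : ((a:Int), (b:Int)) = (((K:Int)+1), ((J:Int)+1))
        · have hab : a = K + 1 ∧ b = J + 1 := by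
            simp only [Prod.mk.injEq] at hkey
            omega
          rw [if_pos hkey, hab.1, hab.2]
        · rw [if_neg hkey]
          apply ih1 a b ha hb
          rcases hc with h | h | ⟨h1, h2⟩
          · exact Or.inl h
          · exact Or.inr (Or.inl h)
          · rcases Nat.lt_or_ge b (J+1) with hb' | hb'
            · exact Or.inr (Or.inr ⟨h1, by omega⟩)
            · exfalso; apply hkey
              have : b = J + 1 := by omega
              rw [h1, this, Prod.ext_iff]
              constructor <;> push_cast <;> ring
      · show ((J:Int) + 1) = _
        simp

lemma outer_spec (s1 s2 : List Char) :
    ∀ (M : Nat), M ≤ s1.length → ∀ (t : PySem.Dict (Int × Int) Int),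
    (∀ a b : Nat, a ≤ s1.length → b ≤ s2.length → (b = 0 ∨ a = 0) →
        t.getD ((a:Int), (b:Int)) 0 = EDf s1 s2 a b) →
    (∀ a b : Nat, a ≤ s1.length → b ≤ s2.length → (b = 0 ∨ a ≤ M) →
      (((List.range M).map (fun k : Nat => ((k:Int)+1))).foldl
        (fun (q : PySem.Dict (Int × Int) Int × Int × Int) i =>
          let r : PySem.Dict (Int × Int) Int × Int :=
            (((List.range s2.length).map (fun k : Nat => ((k:Int)+1))).foldl
              (fun (r : PySem.Dict (Int × Int) Int × Int) j =>
                (r.1.insert (i, j)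
                  (min (min (r.1.getD (i, j - 1) 0 + 1) (r.1.getD (i - 1, j) 0 + 1))
                    (r.1.getD (i - 1, j - 1) 0 +
                      (if PySem.List.pyGet? s1 (i - 1) = PySem.List.pyGet? s2 (j - 1) then 0 else 1))), j))
              (q.1, q.2.2))
          (r.1, i, r.2)) (t, ((s1.length:Int)), ((s2.length:Int)))).1.getD ((a:Int), (b:Int)) 0
        = EDf s1 s2 a b)
    ∧ (((List.range M).map (fun k : Nat => ((k:Int)+1))).foldl
        (fun (q : PySem.Dict (Int × Int) Int × Int × Int) i =>
          let r : PySem.Dict (Int × Int) Int × Int :=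
            (((List.range s2.length).map (fun k : Nat => ((k:Int)+1))).foldl
              (fun (r : PySem.Dict (Int × Int) Int × Int) j =>
                (r.1.insert (i, j)
                  (min (min (r.1.getD (i, j - 1) 0 + 1) (r.1.getD (i - 1, j) 0 + 1))
                    (r.1.getD (i - 1, j - 1) 0 +
                      (if PySem.List.pyGet? s1 (i - 1) = PySem.List.pyGet? s2 (j - 1) then 0 else 1))), j))
              (q.1, q.2.2))
          (r.1, i, r.2)) (t, ((s1.length:Int)), ((s2.length:Int)))).2
        = ((if M = 0 then ((s1.length:Int)) else (M:Int)), ((s2.length:Int))) := by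
  intro M
  induction M with
  | zero =>
      intro _ t ht
      refine ⟨fun a b ha hb hc => ?_, by simp⟩
      apply ht a b ha hb
      rcases hc with h | h
      · exact Or.inl h
      · exact Or.inr (by omega)
  | succ M ihM =>
      intro hM t ht
      have hM' : M ≤ s1.length := by omega
      obtain ⟨ih1, ih2⟩ := ihM hM' t ht
      rw [List.range_succ]
      simp only [List.map_append, List.map_cons, List.map_nil, List.foldl_append, List.foldl_cons,
        List.foldl_nil]
      set q := (((List.range M).map (fun k : Nat => ((k:Int)+1))).foldl
        (fun (q : PySem.Dict (Int × Int) Int × Int × Int) i =>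
          let r : PySem.Dict (Int × Int) Int × Int :=
            (((List.range s2.length).map (fun k : Nat => ((k:Int)+1))).foldl
              (fun (r : PySem.Dict (Int × Int) Int × Int) j =>
                (r.1.insert (i, j)
                  (min (min (r.1.getD (i, j - 1) 0 + 1) (r.1.getD (i - 1, j) 0 + 1))
                    (r.1.getD (i - 1, j - 1) 0 +
                      (if PySem.List.pyGet? s1 (i - 1) = PySem.List.pyGet? s2 (j - 1) then 0 else 1))), j))
              (q.1, q.2.2))
          (r.1, i, r.2)) (t, ((s1.length:Int)), ((s2.length:Int)))) with hq
      have hKlt : M < s1.length := by omega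
      have hinner := inner_spec s1 s2 M hKlt s2.length (le_refl _) q.1 q.2.2
        (fun a b ha hb hc => by
          apply ih1 a b ha hb
          rcases hc with h | h | ⟨h1, h2⟩
          · exact Or.inl h
          · exact Or.inr h
          · exact Or.inl (by omega))
      refine ⟨fun a b ha hb hc => ?_, ?_⟩
      · show (((List.range s2.length).map (fun k : Nat => ((k:Int)+1))).foldl _ (q.1, q.2.2)).1.getD _ 0 = _
        apply hinner.1 a b ha hb
        rcases hc with h | h
        · exact Or.inl h
        · rcases Nat.lt_or_ge a (M+1) with h' | h'
          · exact Or.inr (Or.inl (by omega))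
          · exact Or.inr (Or.inr ⟨by omega, hb⟩)
      · show (((M:Int)+1), (((List.range s2.length).map (fun k : Nat => ((k:Int)+1))).foldl _ (q.1, q.2.2)).2) = _
        have h22 : q.2.2 = ((s2.length : Int)) := by rw [ih2]
        rw [hinner.2, h22]
        simp only [Prod.mk.injEq]
        refine ⟨by rw [if_neg (Nat.succ_ne_zero M)]; push_cast; ring, by split_ifs <;> rfl⟩

lemma pyRange_zero_cast (N : Nat) :
    PySem.List.pyRange 0 ((N:Int)+1) 1 = (List.range (N+1)).map (fun k : Nat => (k:Int)) := by
  rw [show ((N:Int)+1) = ((N+1 : Nat):Int) by push_cast; ring, PySem.List.pyRange_one]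
  simp

lemma pyRange_one_cast (N : Nat) :
    PySem.List.pyRange 1 ((N:Int)+1) 1 = (List.range N).map (fun k : Nat => ((k:Int)+1)) := by
  rw [PySem.List.pyRange_one]
  simp [add_comm]

lemma edA_eq_EDf (s1 s2 : List Char) : edA s1 s2 = EDf s1 s2 s1.length s2.length := by
  unfold edA
  simp only []
  rw [pyRange_zero_cast s1.length, pyRange_zero_cast s2.length,
    pyRange_one_cast s1.length, pyRange_one_cast s2.length]
  have f1 := fold1_spec (s1.length + 1) 0
  have e1 : (((List.range (s1.length+1)).map (fun k : Nat => (k:Int))).foldl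
      (fun (p : PySem.Dict (Int × Int) Int × Int) i => (p.1.insert (i, 0) i, i))
      (PySem.Dict.empty, 0)).2 = ((s1.length : Int)) := by
    rw [f1.2, if_neg (Nat.succ_ne_zero _)]
    push_cast; ring
  have f2 := fold2_spec (s2.length + 1)
    (((List.range (s1.length+1)).map (fun k : Nat => (k:Int))).foldl
      (fun (p : PySem.Dict (Int × Int) Int × Int) i => (p.1.insert (i, 0) i, i))
      (PySem.Dict.empty, 0)).1 0
  have e2 : (((List.range (s2.length+1)).map (fun k : Nat => (k:Int))).foldl
      (fun (p : PySem.Dict (Int × Int) Int × Int) j => (p.1.insert (0, j) j, j))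
      ((((List.range (s1.length+1)).map (fun k : Nat => (k:Int))).foldl
        (fun (p : PySem.Dict (Int × Int) Int × Int) i => (p.1.insert (i, 0) i, i))
        (PySem.Dict.empty, 0)).1, 0)).2 = ((s2.length : Int)) := by
    rw [f2.2, if_neg (Nat.succ_ne_zero _)]
    push_cast; ring
  rw [e1, e2]
  have ht : ∀ a b : Nat, a ≤ s1.length → b ≤ s2.length → (b = 0 ∨ a = 0) →
      (((List.range (s2.length+1)).map (fun k : Nat => (k:Int))).foldl
        (fun (p : PySem.Dict (Int × Int) Int × Int) j => (p.1.insert (0, j) j, j))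
        ((((List.range (s1.length+1)).map (fun k : Nat => (k:Int))).foldl
          (fun (p : PySem.Dict (Int × Int) Int × Int) i => (p.1.insert (i, 0) i, i))
          (PySem.Dict.empty, 0)).1, 0)).1.getD ((a:Int), (b:Int)) 0 = EDf s1 s2 a b := by
    intro a b ha hb hc
    rw [f2.1]
    by_cases hA : a = 0
    · subst hA
      rw [if_pos ⟨rfl, by positivity, by push_cast; omega⟩, EDf_row0]
    · have hb0 : b = 0 := by rcases hc with h | h; exact h; omega
      subst hb0
      rw [if_neg (by simp; intro h; omega), f1.1,
        if_pos ⟨rfl, by positivity, by push_cast; omega⟩, EDf_col0]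
  have hout := outer_spec s1 s2 s1.length (le_refl _) _ ht
  rw [hout.2]
  have hfst : (if s1.length = 0 then ((s1.length:Int)) else ((s1.length:Int))) = ((s1.length:Int)) := by
    split_ifs <;> rfl
  rw [hfst]
  exact hout.1 s1.length s2.length (le_refl _) (le_refl _) (Or.inr (le_refl _))

-- ---- B-side: neighbouring cells of the edit-distance matrix differ by at most 1 ----
lemma EDf_le_right (s1 s2 : List Char) (i j : Nat) : EDf s1 s2 i (j+1) ≤ EDf s1 s2 i j + 1 := by
  cases i with
  | zero => rw [EDf_row0, EDf_row0]; push_cast; omega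
  | succ i => rw [EDf]; omega

lemma EDf_le_left (s1 s2 : List Char) (i j : Nat) : EDf s1 s2 (i+1) j ≤ EDf s1 s2 i j + 1 := by
  cases j with
  | zero => rw [EDf_col0, EDf_col0]; push_cast; omega
  | succ j => rw [EDf]; omega

lemma EDf_right_le (s1 s2 : List Char) (i j : Nat) : EDf s1 s2 i j ≤ EDf s1 s2 i (j+1) + 1 := by
  induction i with
  | zero => rw [EDf_row0, EDf_row0]; push_cast; omega
  | succ i ih =>
      have h1 := EDf_le_left s1 s2 i j
      conv_rhs => rw [EDf]
      have hc : (0:Int) ≤ (if s1.getD i ' ' ≠ s2.getD j ' ' then 1 else 0) := by positivity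
      omega

lemma EDf_left_le (s1 s2 : List Char) (i j : Nat) : EDf s1 s2 i j ≤ EDf s1 s2 (i+1) j + 1 := by
  induction j with
  | zero => rw [EDf_col0, EDf_col0]; push_cast; omega
  | succ j ih =>
      have h1 := EDf_le_right s1 s2 i j
      conv_rhs => rw [EDf]
      have hc : (0:Int) ≤ (if s1.getD i ' ' ≠ s2.getD j ' ' then 1 else 0) := by positivity
      omega

-- a matching pair of characters is free
lemma EDf_match (s1 s2 : List Char) (i j : Nat) (h : s1.getD i ' ' = s2.getD j ' ') :
    EDf s1 s2 (i+1) (j+1) = EDf s1 s2 i j := by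
  rw [EDf, if_neg (not_ne_iff.mpr h)]
  have h1 := EDf_left_le s1 s2 i j
  have h2 := EDf_right_le s1 s2 i j
  omega

lemma strip_spec (s1 s2 : List Char) : ∀ i j : Nat,
    EDf s1 s2 (stripB s1 s2 i j).1 (stripB s1 s2 i j).2 = EDf s1 s2 i j ∧
    (stripB s1 s2 i j).1 ≤ i ∧ (stripB s1 s2 i j).2 ≤ j ∧
    ((stripB s1 s2 i j).1 = 0 ∨ (stripB s1 s2 i j).2 = 0 ∨
      s1.getD ((stripB s1 s2 i j).1 - 1) ' ' ≠ s2.getD ((stripB s1 s2 i j).2 - 1) ' ') := by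
  intro i
  induction i with
  | zero => intro j; cases j <;> simp [stripB]
  | succ i ih =>
      intro j
      cases j with
      | zero => simp [stripB]
      | succ j =>
          by_cases h : s1.getD i ' ' = s2.getD j ' '
          · have hs : stripB s1 s2 (i+1) (j+1) = stripB s1 s2 i j := by
              rw [stripB, if_pos h]
            obtain ⟨e, h1, h2, h3⟩ := ih j
            rw [hs]
            exact ⟨by rw [e, EDf_match s1 s2 i j h], by omega, by omega, h3⟩
          · have hs : stripB s1 s2 (i+1) (j+1) = (i+1, j+1) := by
              rw [stripB, if_neg h]
            rw [hs]
            exact ⟨rfl, le_refl _, le_refl _, Or.inr (Or.inr (by simpa using h))⟩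

-- a Good cell: in the box, both coordinates positive, mismatching corner characters
def GoodB (s1 s2 : List Char) (p : Nat × Nat) : Prop :=
  p.1 ≠ 0 ∧ p.2 ≠ 0 ∧ p.1 ≤ s1.length ∧ p.2 ≤ s2.length ∧
  s1.getD (p.1 - 1) ' ' ≠ s2.getD (p.2 - 1) ' '

lemma child_good (s1 s2 : List Char) (p q : Nat × Nat) (hp : GoodB s1 s2 p)
    (hq : q ∈ childrenB s1 s2 p.1 p.2) :
    q.1 ≤ s1.length ∧ q.2 ≤ s2.length ∧ q.1 + q.2 < p.1 + p.2 ∧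
    (q.1 ≠ 0 → q.2 ≠ 0 → GoodB s1 s2 q) := by
  obtain ⟨hp1, hp2, hp3, hp4, hp5⟩ := hp
  have key : ∀ a b : Nat, a ≤ s1.length → b ≤ s2.length → a + b < p.1 + p.2 →
      q = stripB s1 s2 a b →
      q.1 ≤ s1.length ∧ q.2 ≤ s2.length ∧ q.1 + q.2 < p.1 + p.2 ∧
      (q.1 ≠ 0 → q.2 ≠ 0 → GoodB s1 s2 q) := by
    intro a b ha hb hab hq
    obtain ⟨_, h1, h2, h3⟩ := strip_spec s1 s2 a b
    rw [← hq] at h1 h2 h3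
    refine ⟨by omega, by omega, by omega, fun z1 z2 => ?_⟩
    rcases h3 with h | h | h
    · omega
    · omega
    · exact ⟨z1, z2, by omega, by omega, h⟩
  simp only [childrenB, List.mem_cons] at hq
  rcases hq with h | h | h | h
  · exact key (p.1 - 1) p.2 (by omega) hp4 (by omega) h
  · exact key p.1 (p.2 - 1) hp3 (by omega) (by omega) h
  · exact key (p.1 - 1) (p.2 - 1) (by omega) (by omega) (by omega) h
  · cases h

-- cells in the box are at most |s1|·|s2| many
lemma card_bound (s1 s2 : List Char) (seen : List (Nat × Nat)) (hnd : seen.Nodup)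
    (hg : ∀ p ∈ seen, GoodB s1 s2 p) : seen.length ≤ s1.length * s2.length := by
  classical
  have hsub : seen.toFinset ⊆ Finset.Icc 1 s1.length ×ˢ Finset.Icc 1 s2.length := by
    intro p hp
    obtain ⟨h1, h2, h3, h4, _⟩ := hg p (List.mem_toFinset.mp hp)
    simp only [Finset.mem_product, Finset.mem_Icc]
    omega
  have := Finset.card_le_card hsub
  rw [List.toFinset_card_of_nodup hnd] at this
  simpa [Nat.card_Icc] using this

-- the inner for-loop of the discovery pass
lemma fold_discover (cs : List (Nat × Nat)) :
    ∀ (seen todo : List (Nat × Nat)), seen.Nodup → (∀ x ∈ todo, x ∈ seen) →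
    (cs.foldl (fun (st : List (Nat × Nat) × List (Nat × Nat)) q =>
        if q.1 ≠ 0 ∧ q.2 ≠ 0 ∧ q ∉ st.1 then (st.1 ++ [q], q :: st.2) else st) (seen, todo)).1.Nodup ∧
    (∀ x ∈ (cs.foldl (fun (st : List (Nat × Nat) × List (Nat × Nat)) q =>
        if q.1 ≠ 0 ∧ q.2 ≠ 0 ∧ q ∉ st.1 then (st.1 ++ [q], q :: st.2) else st) (seen, todo)).2,
      x ∈ (cs.foldl (fun (st : List (Nat × Nat) × List (Nat × Nat)) q =>
        if q.1 ≠ 0 ∧ q.2 ≠ 0 ∧ q ∉ st.1 then (st.1 ++ [q], q :: st.2) else st) (seen, todo)).1) ∧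
    seen <+: (cs.foldl (fun (st : List (Nat × Nat) × List (Nat × Nat)) q =>
        if q.1 ≠ 0 ∧ q.2 ≠ 0 ∧ q ∉ st.1 then (st.1 ++ [q], q :: st.2) else st) (seen, todo)).1 ∧
    (∀ x ∈ (cs.foldl (fun (st : List (Nat × Nat) × List (Nat × Nat)) q =>
        if q.1 ≠ 0 ∧ q.2 ≠ 0 ∧ q ∉ st.1 then (st.1 ++ [q], q :: st.2) else st) (seen, todo)).1,
      x ∈ seen ∨ (x ∈ cs ∧ x.1 ≠ 0 ∧ x.2 ≠ 0)) ∧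
    (∀ q ∈ cs, q.1 ≠ 0 → q.2 ≠ 0 → q ∈ (cs.foldl (fun (st : List (Nat × Nat) × List (Nat × Nat)) q =>
        if q.1 ≠ 0 ∧ q.2 ≠ 0 ∧ q ∉ st.1 then (st.1 ++ [q], q :: st.2) else st) (seen, todo)).1) ∧
    todo <:+ (cs.foldl (fun (st : List (Nat × Nat) × List (Nat × Nat)) q =>
        if q.1 ≠ 0 ∧ q.2 ≠ 0 ∧ q ∉ st.1 then (st.1 ++ [q], q :: st.2) else st) (seen, todo)).2 ∧
    (∀ x ∈ (cs.foldl (fun (st : List (Nat × Nat) × List (Nat × Nat)) q =>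
        if q.1 ≠ 0 ∧ q.2 ≠ 0 ∧ q ∉ st.1 then (st.1 ++ [q], q :: st.2) else st) (seen, todo)).2,
      x ∈ todo ∨ x ∉ seen) ∧
    (∀ x ∈ (cs.foldl (fun (st : List (Nat × Nat) × List (Nat × Nat)) q =>
        if q.1 ≠ 0 ∧ q.2 ≠ 0 ∧ q ∉ st.1 then (st.1 ++ [q], q :: st.2) else st) (seen, todo)).1,
      x ∈ seen ∨ x ∈ (cs.foldl (fun (st : List (Nat × Nat) × List (Nat × Nat)) q =>
        if q.1 ≠ 0 ∧ q.2 ≠ 0 ∧ q ∉ st.1 then (st.1 ++ [q], q :: st.2) else st) (seen, todo)).2) ∧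
    (cs.foldl (fun (st : List (Nat × Nat) × List (Nat × Nat)) q =>
        if q.1 ≠ 0 ∧ q.2 ≠ 0 ∧ q ∉ st.1 then (st.1 ++ [q], q :: st.2) else st) (seen, todo)).1.length
      + todo.length
      = seen.length + (cs.foldl (fun (st : List (Nat × Nat) × List (Nat × Nat)) q =>
        if q.1 ≠ 0 ∧ q.2 ≠ 0 ∧ q ∉ st.1 then (st.1 ++ [q], q :: st.2) else st) (seen, todo)).2.length := by
  induction cs with
  | nil =>
      intro seen todo hnd hsub
      exact ⟨hnd, hsub, List.prefix_refl _, fun x hx => Or.inl hx, fun q hq => absurd hq (by simp),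
        List.suffix_refl _, fun x hx => Or.inl hx, fun x hx => Or.inl hx, rfl⟩
  | cons c cs ih =>
      intro seen todo hnd hsub
      simp only [List.foldl_cons]
      by_cases hc : c.1 ≠ 0 ∧ c.2 ≠ 0 ∧ c ∉ seen
      · rw [if_pos hc]
        obtain ⟨i1, i2, i3, i4, i5, i6, i7, i8, i9⟩ := ih (seen ++ [c]) (c :: todo)
          (by
            rw [List.nodup_append]
            refine ⟨hnd, by simp, ?_⟩
            intro a ha b hb
            have hbc : b = c := by simpa using hb
            subst hbc
            rintro rfl
            exact hc.2.2 ha)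
          (by intro x hx; rcases List.mem_cons.mp hx with h | h
              · simp [h]
              · simp [hsub x h])
        refine ⟨i1, i2, (List.prefix_append seen [c]).trans i3, ?_, ?_, ?_, ?_, ?_, ?_⟩
        · intro x hx
          rcases i4 x hx with h | h
          · rcases List.mem_append.mp h with h' | h'
            · exact Or.inl h'
            · simp only [List.mem_singleton] at h'
              subst h'
              exact Or.inr ⟨List.mem_cons_self .., hc.1, hc.2.1⟩
          · exact Or.inr ⟨List.mem_cons_of_mem _ h.1, h.2⟩
        · intro q hq z1 z2
          rcases List.mem_cons.mp hq with h | h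
          · subst h
            exact i3.subset (by simp)
          · exact i5 q h z1 z2
        · exact (List.suffix_cons c todo).trans i6
        · intro x hx
          rcases i7 x hx with h | h
          · rcases List.mem_cons.mp h with h' | h'
            · subst h'; exact Or.inr hc.2.2
            · exact Or.inl h'
          · exact Or.inr (fun hxs => h (List.mem_append_left _ hxs))
        · intro x hx
          rcases i8 x hx with h | h
          · rcases List.mem_append.mp h with h' | h'
            · exact Or.inl h'
            · simp only [List.mem_singleton] at h'
              subst h'
              exact Or.inr (i6.subset (List.mem_cons_self ..))
          · exact Or.inr h
        · simp only [List.length_append, List.length_cons, List.length_nil] at i9 ⊢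
          omega
      · rw [if_neg hc]
        obtain ⟨i1, i2, i3, i4, i5, i6, i7, i8, i9⟩ := ih seen todo hnd hsub
        refine ⟨i1, i2, i3, ?_, ?_, i6, i7, i8, i9⟩
        · intro x hx
          rcases i4 x hx with h | h
          · exact Or.inl h
          · exact Or.inr ⟨List.mem_cons_of_mem _ h.1, h.2⟩
        · intro q hq z1 z2
          rcases List.mem_cons.mp hq with h | h
          · subst h
            have hqs : q ∈ seen := by
              by_contra hns
              exact hc ⟨z1, z2, hns⟩
            exact i3.subset hqs
          · exact i5 q h z1 z2

lemma discover_spec (s1 s2 : List Char) (hm : 1 ≤ s1.length) (hn : 1 ≤ s2.length) :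
    ∀ (fuel : Nat) (seen todo : List (Nat × Nat)),
    seen.Nodup →
    (∀ p ∈ seen, GoodB s1 s2 p) →
    (∀ p ∈ todo, p ∈ seen) →
    (∀ p ∈ seen, p ∉ todo → ∀ q ∈ childrenB s1 s2 p.1 p.2, q.1 ≠ 0 → q.2 ≠ 0 → q ∈ seen) →
    todo.length + 2 * ((s1.length + 1) * (s2.length + 1) - seen.length) + 1 ≤ fuel →
    (∀ p ∈ seen, p ∈ discoverB s1 s2 fuel seen todo) ∧
    (discoverB s1 s2 fuel seen todo).Nodup ∧
    (∀ p ∈ discoverB s1 s2 fuel seen todo, GoodB s1 s2 p) ∧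
    (∀ p ∈ discoverB s1 s2 fuel seen todo, ∀ q ∈ childrenB s1 s2 p.1 p.2,
        q.1 ≠ 0 → q.2 ≠ 0 → q ∈ discoverB s1 s2 fuel seen todo) := by
  intro fuel
  induction fuel with
  | zero => intro seen todo _ _ _ _ hfuel; omega
  | succ fuel ih =>
      intro seen todo hnd hg hts hcl hfuel
      cases todo with
      | nil =>
          refine ⟨fun p hp => ?_, ?_, ?_, ?_⟩ <;> rw [discoverB]
          · exact hp
          · exact hnd
          · exact hg
          · exact fun p hp q hq z1 z2 => hcl p hp (by simp) q hq z1 z2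
      | cons p todo =>
          rw [discoverB]
          have hpseen : p ∈ seen := hts p (List.mem_cons_self ..)
          have hpgood : GoodB s1 s2 p := hg p hpseen
          obtain ⟨f1, f2, f3, f4, f5, f6, f7, f8, f9⟩ :=
            fold_discover (childrenB s1 s2 p.1 p.2) seen todo hnd
              (fun x hx => hts x (List.mem_cons_of_mem _ hx))
          set st := (childrenB s1 s2 p.1 p.2).foldl
            (fun (st : List (Nat × Nat) × List (Nat × Nat)) q =>
              if q.1 ≠ 0 ∧ q.2 ≠ 0 ∧ q ∉ st.1 then (st.1 ++ [q], q :: st.2) else st)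
            (seen, todo) with hst
          have hg' : ∀ x ∈ st.1, GoodB s1 s2 x := by
            intro x hx
            rcases f4 x hx with h | ⟨h1, h2, h3⟩
            · exact hg x h
            · exact (child_good s1 s2 p x hpgood h1).2.2.2 h2 h3
          have hcl' : ∀ x ∈ st.1, x ∉ st.2 →
              ∀ q ∈ childrenB s1 s2 x.1 x.2, q.1 ≠ 0 → q.2 ≠ 0 → q ∈ st.1 := by
            intro x hx hnx q hq z1 z2
            by_cases hxseen : x ∈ seen
            · by_cases hxp : x = p
              · subst hxp
                exact f5 q hq z1 z2
              · have hxt : x ∉ todo := fun h => hnx (f6.subset h)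
                have := hcl x hxseen (by simp [hxp, hxt]) q hq z1 z2
                exact f3.subset this
            · exfalso
              rcases f8 x hx with h | h
              · exact hxseen h
              · exact hnx h
          have hb1 : seen.length ≤ st.1.length := f3.length_le
          have hb2 : st.1.length ≤ s1.length * s2.length := card_bound s1 s2 st.1 f1 hg'
          have hfuel' : st.2.length + 2 * ((s1.length + 1) * (s2.length + 1) - st.1.length) + 1
              ≤ fuel := by
            have hB : s1.length * s2.length + 3 ≤ (s1.length + 1) * (s2.length + 1) := by
              have : (s1.length + 1) * (s2.length + 1)
                  = s1.length * s2.length + s1.length + s2.length + 1 := by ring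
              omega
            simp only [List.length_cons] at hfuel
            omega
          obtain ⟨r1, r2, r3, r4⟩ := ih st.1 st.2 f1 hg' f2 hcl' hfuel'
          exact ⟨fun x hx => r1 x (f3.subset hx), r2, r3, r4⟩

-- the pass-2 fold: cells sorted by i+j, each cell gets its edit-distance value
lemma eval_go (s1 s2 : List Char) (cells : List (Nat × Nat))
    (hnd : cells.Nodup)
    (hg : ∀ c ∈ cells, GoodB s1 s2 c)
    (hcl : ∀ c ∈ cells, ∀ q ∈ childrenB s1 s2 c.1 c.2, q.1 ≠ 0 → q.2 ≠ 0 → q ∈ cells)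
    (hpw : cells.Pairwise (fun a b => a.1 + a.2 ≤ b.1 + b.2)) :
    ∀ (suf pre : List (Nat × Nat)) (memo : PySem.Dict (Nat × Nat) Int),
    cells = pre ++ suf →
    (∀ p ∈ pre, memo.getD p 0 = EDf s1 s2 p.1 p.2) →
    ∀ p ∈ cells,
      (suf.foldl (fun memo p =>
        memo.insert p (1 + min (min (childValB memo (stripB s1 s2 (p.1 - 1) p.2))
                                    (childValB memo (stripB s1 s2 p.1 (p.2 - 1))))
                               (childValB memo (stripB s1 s2 (p.1 - 1) (p.2 - 1))))) memo).getD p 0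
        = EDf s1 s2 p.1 p.2 := by
  intro suf
  induction suf with
  | nil =>
      intro pre memo hsplit hpre p hp
      rw [hsplit, List.append_nil] at hp
      exact hpre p hp
  | cons c suf ihs =>
      intro pre memo hsplit hpre p hp
      have hcmem : c ∈ cells := by rw [hsplit]; simp
      obtain ⟨hc1, hc2, hc3, hc4, hc5⟩ := hg c hcmem
      have hcpre : c ∉ pre := by
        rw [hsplit] at hnd
        rcases List.nodup_append.mp hnd with ⟨-, -, hdisj⟩
        intro hcp
        exact hdisj c hcp c (List.mem_cons_self ..) rfl
      -- value of each entry of the min-generator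
      have hchild : ∀ (x y : Nat), x + y < c.1 + c.2 →
          stripB s1 s2 x y ∈ childrenB s1 s2 c.1 c.2 →
          childValB memo (stripB s1 s2 x y) = EDf s1 s2 x y := by
        intro x y hxy hmemb
        obtain ⟨he, h1, h2, h3⟩ := strip_spec s1 s2 x y
        set q := stripB s1 s2 x y with hqdef
        by_cases hq1 : q.1 = 0
        · rw [childValB, if_pos hq1, ← he, hq1, EDf_row0]
        by_cases hq2 : q.2 = 0
        · rw [childValB, if_neg hq1, if_pos hq2, ← he, hq2, EDf_col0]
        rw [childValB, if_neg hq1, if_neg hq2]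
        have hqcells : q ∈ cells := hcl c hcmem q hmemb hq1 hq2
        have hqsum : q.1 + q.2 < c.1 + c.2 := by omega
        have hqpre : q ∈ pre := by
          rw [hsplit] at hqcells hpw
          rcases List.mem_append.mp hqcells with h | h
          · exact h
          · exfalso
            rcases List.mem_cons.mp h with h' | h'
            · subst h'; omega
            · have hcq := (List.pairwise_cons.mp (List.pairwise_append.mp hpw).2.1).1 q h'
              omega
        rw [hpre q hqpre, he]
      have hv1 := hchild (c.1 - 1) c.2 (by omega)
        (by simp [childrenB])
      have hv2 := hchild c.1 (c.2 - 1) (by omega)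
        (by simp [childrenB])
      have hv3 := hchild (c.1 - 1) (c.2 - 1) (by omega)
        (by simp [childrenB])
      have hval : 1 + min (min (childValB memo (stripB s1 s2 (c.1 - 1) c.2))
                               (childValB memo (stripB s1 s2 c.1 (c.2 - 1))))
                          (childValB memo (stripB s1 s2 (c.1 - 1) (c.2 - 1)))
          = EDf s1 s2 c.1 c.2 := by
        rw [hv1, hv2, hv3]
        obtain ⟨a, ha⟩ := Nat.exists_eq_succ_of_ne_zero hc1
        obtain ⟨b, hb⟩ := Nat.exists_eq_succ_of_ne_zero hc2
        have hc5' : s1.getD a ' ' ≠ s2.getD b ' ' := by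
          rw [ha, hb] at hc5
          simpa using hc5
        rw [ha, hb]
        simp only [Nat.succ_sub_one, Nat.succ_eq_add_one]
        rw [show EDf s1 s2 (a+1) (b+1)
            = min (min (EDf s1 s2 (a+1) b + 1) (EDf s1 s2 a (b+1) + 1))
                (EDf s1 s2 a b + (if s1.getD a ' ' ≠ s2.getD b ' ' then 1 else 0)) from by rw [EDf],
          if_pos hc5']
        omega
      simp only [List.foldl_cons]
      apply ihs (pre ++ [c]) (memo.insert c _)
        (by rw [hsplit, List.append_assoc]; rfl)
      · intro x hx
        rcases List.mem_append.mp hx with h | h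
        · rw [PySem.Dict.getD_insert, if_neg (by rintro rfl; exact hcpre h)]
          exact hpre x h
        · simp only [List.mem_singleton] at h
          subst h
          rw [PySem.Dict.getD_insert, if_pos rfl, hval]
      · exact hp

lemma edB_eq_EDf (s1 s2 : List Char) : edB s1 s2 = EDf s1 s2 s1.length s2.length := by
  unfold edB
  obtain ⟨he, h1, h2, h3⟩ := strip_spec s1 s2 s1.length s2.length
  set start := stripB s1 s2 s1.length s2.length with hstart
  by_cases hs1 : start.1 = 0
  · rw [if_pos hs1, ← he, hs1, EDf_row0]
  by_cases hs2 : start.2 = 0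
  · rw [if_neg hs1, if_pos hs2, ← he, hs2, EDf_col0]
  rw [if_neg hs1, if_neg hs2]
  have hgood : GoodB s1 s2 start := by
    refine ⟨hs1, hs2, h1, h2, ?_⟩
    rcases h3 with h | h | h
    · exact absurd h hs1
    · exact absurd h hs2
    · exact h
  have hm : 1 ≤ s1.length := by
    have := hgood.1
    omega
  have hn : 1 ≤ s2.length := by
    have := hgood.2.1
    omega
  obtain ⟨r1, r2, r3, r4⟩ := discover_spec s1 s2 hm hn
    (2 * (s1.length + 1) * (s2.length + 1) + 2) [start] [start]
    (List.nodup_singleton _)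
    (by intro p hp; rw [List.mem_singleton] at hp; subst hp; exact hgood)
    (fun p hp => hp)
    (by intro p hp hnp; exact absurd hp hnp)
    (by
      have hB : 0 < (s1.length + 1) * (s2.length + 1) := by positivity
      have h2 : 2 * (s1.length + 1) * (s2.length + 1)
          = 2 * ((s1.length + 1) * (s2.length + 1)) := by ring
      simp only [List.length_singleton]
      omega)
  set r := discoverB s1 s2 (2 * (s1.length + 1) * (s2.length + 1) + 2) [start] [start] with hr
  have hperm : (PySem.List.sorted r (fun p => p.1 + p.2) false).Perm r :=
    PySem.List.sorted_perm r (fun p => p.1 + p.2) false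
  have hndc : (PySem.List.sorted r (fun p => p.1 + p.2) false).Nodup := hperm.nodup_iff.mpr r2
  have hmemc : ∀ x : Nat × Nat, x ∈ PySem.List.sorted r (fun p => p.1 + p.2) false ↔ x ∈ r :=
    fun x => PySem.List.mem_sorted r (fun p => p.1 + p.2) false x
  have hstartc : start ∈ PySem.List.sorted r (fun p => p.1 + p.2) false :=
    (hmemc start).mpr (r1 start (List.mem_singleton_self _))
  have := eval_go s1 s2 (PySem.List.sorted r (fun p => p.1 + p.2) false) hndc
    (fun c hc => r3 c ((hmemc c).mp hc))
    (fun c hc q hq z1 z2 => (hmemc q).mpr (r4 c ((hmemc c).mp hc) q hq z1 z2))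
    (PySem.List.sorted_pairwise r (fun p => p.1 + p.2))
    (PySem.List.sorted r (fun p => p.1 + p.2) false) [] PySem.Dict.empty rfl
    (by intro p hp; cases hp)
    start hstartc
  exact this.trans he

-- ---- the per-isoform wrapper loops ----
def spineo (r a : List Char) : Int → List (String × Int × Int) → List (String × Int)
  | _, [] => []
  | bu, p :: rest =>
      (p.1, edA (PySem.List.slice r (some (p.2.1 - 1)) (some p.2.2))
                (PySem.List.slice a (some bu) (some (bu + (p.2.2 - p.2.1 + 1)))))
        :: spineo r a (bu + (p.2.2 - p.2.1 + 1)) rest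

lemma loopA_items (r a : List Char) :
    ∀ (l : List (String × Int × Int)) (acc : PySem.Dict String Int) (bu : Int),
    (∀ p ∈ l, acc.contains p.1 = false) → (l.map (·.1)).Nodup →
    (l.foldl (fun (st : PySem.Dict String Int × Int) p =>
        (st.1.insert p.1 (edA (PySem.List.slice r (some (p.2.1 - 1)) (some p.2.2))
                              (PySem.List.slice a (some st.2) (some (st.2 + (p.2.2 - p.2.1 + 1))))),
         st.2 + (p.2.2 - p.2.1 + 1))) (acc, bu)).1.items
      = acc.items ++ spineo r a bu l := by
  intro l
  induction l with
  | nil => intro acc bu _ _; simp [spineo]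
  | cons p rest ih =>
      intro acc bu hfresh hnd
      simp only [List.foldl_cons]
      have hcontains : acc.contains p.1 = false := hfresh p (List.mem_cons_self ..)
      have hfresh' : ∀ q ∈ rest, (acc.insert p.1 (edA (PySem.List.slice r (some (p.2.1 - 1)) (some p.2.2))
          (PySem.List.slice a (some bu) (some (bu + (p.2.2 - p.2.1 + 1)))))).contains q.1 = false := by
        intro q hq
        rw [PySem.Dict.contains_insert]
        have h1 : q.1 ≠ p.1 := by
          simp only [List.map_cons, List.nodup_cons] at hnd
          intro h
          exact hnd.1 (h ▸ List.mem_map_of_mem hq)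
        simp [h1, hfresh q (List.mem_cons_of_mem _ hq)]
      have hnd' : (rest.map (·.1)).Nodup := by
        simp only [List.map_cons, List.nodup_cons] at hnd
        exact hnd.2
      rw [ih _ _ hfresh' hnd', PySem.Dict.items_insert_of_not_contains]
      · simp [spineo]
      · exact hcontains

def psum : Int → List Int → List Int
  | _, [] => []
  | s, L :: rest => (s + L) :: psum (s + L) rest

lemma pyGet?_append_last (xs : List Int) (x : Int) :
    PySem.List.pyGet? (xs ++ [x]) (-1) = some x := by
  simp [PySem.List.pyGet?, PySem.List.pyIdx?]

lemma foldl_starts :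
    ∀ (Ls : List Int) (acc : List Int) (last : Int), PySem.List.pyGet? acc (-1) = some last →
    Ls.foldl (fun st L => st ++ [(PySem.List.pyGet? st (-1)).getD 0 + L]) acc
      = acc ++ psum last Ls := by
  intro Ls
  induction Ls with
  | nil => intro acc last _; simp [psum]
  | cons L rest ih =>
      intro acc last hlast
      simp only [List.foldl_cons, hlast, Option.getD_some]
      rw [ih (acc ++ [last + L]) (last + L) (pyGet?_append_last acc (last + L))]
      simp [psum]

lemma zipspine (r a : List Char) :
    ∀ (l : List (String × Int × Int)) (bu : Int),
    (l.zip ((bu :: psum bu (l.map (fun p => p.2.2 - p.2.1 + 1))).zip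
        (l.map (fun p => p.2.2 - p.2.1 + 1)))).map (fun q =>
      (q.1.1, edA (PySem.List.slice r (some (q.1.2.1 - 1)) (some q.1.2.2))
                  (PySem.List.slice a (some q.2.1) (some (q.2.1 + q.2.2)))))
      = spineo r a bu l := by
  intro l
  induction l with
  | nil => intro bu; simp [spineo]
  | cons p rest ih =>
      intro bu
      simp only [List.map_cons, psum, List.zip_cons_cons]
      rw [spineo]
      exact congrArg _ (ih (bu + (p.2.2 - p.2.1 + 1)))

lemma dist_eq (refseq : String) (altseq : String) (dcan_isos : List (String × Int × Int)) :
    dist_from_ref refseq altseq dcan_isos = dist_from_ref_alt refseq altseq dcan_isos := by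
  unfold dist_from_ref dist_from_ref_alt
  simp only []
  have hnd : (((PySem.Dict.ofList dcan_isos).items.map (·.1)).Nodup) := by
    have := PySem.Dict.nodup_keys_ofList (ps := dcan_isos)
    simpa [PySem.Dict.keys] using this
  rw [loopA_items refseq.toList altseq.toList (PySem.Dict.ofList dcan_isos).items PySem.Dict.empty 0
    (fun p _ => PySem.Dict.contains_empty p.1) hnd]
  rw [foldl_starts _ [0] 0 (by decide)]
  have : ([(0:Int)] ++ psum 0 ((PySem.Dict.ofList dcan_isos).items.map (fun p => p.2.2 - p.2.1 + 1)))
      = (0 : Int) :: psum 0 ((PySem.Dict.ofList dcan_isos).items.map (fun p => p.2.2 - p.2.1 + 1)) := rfl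
  rw [this]
  rw [List.map_congr_left (fun q _ => by
    rw [edB_eq_EDf, ← edA_eq_EDf])]
  rw [zipspine]
  rfl

-- ===== VERDICT (by name: the statement is the Claim_ definition above) =====
theorem dist_from_ref_spec : Claim_equal_dist_from_ref := by
  intro refseq altseq dcan_isos _
  unfold Spec_dist_from_ref
  exact dist_eq refseq altseq dcan_isos
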